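-- pv_equiv track=rewrite | github.com/zhengsl/SmartInventory | compute_cost_test.py | get_city_clusters
-- ===== SOURCE A (Python) =====
-- from collections import defaultdict
--
-- def get_city_clusters(cities, provinces):
--     province_city_dict = defaultdict(list)
--     for city_province in cities:
--         province_city_dict[city_province[1]].append(city_province[0])
--     cities = []
--     for province in provinces:
--         cities.extend(province_city_dict[province])
--     return cities
-- ===== SOURCE B (Python) =====
-- def get_city_clusters(cities, provinces):
--     result = []
--     for province in provinces:
--         for city in cities:
--             if city[1] == province:
--                 result.append(city[0])
--     return result
-- ===== Notes on version B (the rewrite author's own statement) =====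
-- stated objective: simpler
-- what changed: Replaces the defaultdict grouping index followed by bucket concatenation with a direct double loop: for each province scan the cities list and append matching city names.
import Mathlib
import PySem

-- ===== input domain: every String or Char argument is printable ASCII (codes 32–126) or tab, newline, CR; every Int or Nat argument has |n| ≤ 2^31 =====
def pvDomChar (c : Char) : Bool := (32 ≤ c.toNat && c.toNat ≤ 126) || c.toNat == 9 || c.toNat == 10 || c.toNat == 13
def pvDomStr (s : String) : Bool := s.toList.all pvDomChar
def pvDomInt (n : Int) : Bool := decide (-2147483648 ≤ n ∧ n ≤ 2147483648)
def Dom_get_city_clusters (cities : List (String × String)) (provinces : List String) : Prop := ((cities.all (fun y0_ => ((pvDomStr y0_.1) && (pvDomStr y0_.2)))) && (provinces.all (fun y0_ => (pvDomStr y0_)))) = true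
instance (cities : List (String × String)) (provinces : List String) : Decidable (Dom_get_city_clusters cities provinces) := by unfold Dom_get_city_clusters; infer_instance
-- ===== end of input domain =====

-- B drops A's defaultdict grouping index and instead scans the cities list once per province (simpler, no index structure).

-- ===== PORT A =====
-- defaultdict(list): province_city_dict[k].append(v) is a modify with default []
def get_city_clusters (cities : List (String × String)) (provinces : List String) : List String :=
  let province_city_dict : PySem.Dict String (List String) :=
    cities.foldl (fun d city_province => d.modify city_province.2 [] (· ++ [city_province.1]))
      PySem.Dict.empty
  provinces.foldl (fun acc province => acc ++ province_city_dict.getD province []) []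

-- ===== PORT B =====
def get_city_clusters_alt (cities : List (String × String)) (provinces : List String) : List String :=
  provinces.foldl (fun result province =>
    cities.foldl (fun result city => if city.2 == province then result ++ [city.1] else result)
      result) []

-- ===== PRECONDITION & SPEC =====
def Spec_get_city_clusters (cities : List (String × String)) (provinces : List String) (out : List String) : Prop := out = get_city_clusters_alt cities provinces
instance (cities : List (String × String)) (provinces : List String) (out : List String) : Decidable (Spec_get_city_clusters cities provinces out) := by unfold Spec_get_city_clusters; infer_instance

-- ===== CLAIM (what is proved, stated in full; the proofs are below) =====
def Claim_equal_get_city_clusters : Prop := ∀ (cities : List (String × String)) (provinces : List String), Dom_get_city_clusters cities provinces → Spec_get_city_clusters cities provinces (get_city_clusters cities provinces)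

-- ===== LEMMAS AND PROOFS =====

-- the grouping dict's bucket for a province is exactly the filtered scan of cities
theorem pv_bucket (cities : List (String × String)) (d : PySem.Dict String (List String)) (p : String) :
    (cities.foldl (fun d cp => d.modify cp.2 [] (· ++ [cp.1])) d).getD p []
      = d.getD p [] ++ (cities.filter (fun cp => cp.2 == p)).map (·.1) := by
  induction cities generalizing d with
  | nil => simp
  | cons c rest ih =>
      simp only [List.foldl_cons, ih, List.filter_cons]
      rw [PySem.Dict.getD_modify]
      by_cases h : c.2 = p
      · simp [h]
      · have hb : (c.2 == p) = false := by simp [h]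
        rw [if_neg (fun hh => h hh.symm), if_neg (by simp [hb])]

theorem pv_inner (cities : List (String × String)) (p : String) (acc : List String) :
    cities.foldl (fun result city => if city.2 == p then result ++ [city.1] else result) acc
      = acc ++ (cities.filter (fun cp => cp.2 == p)).map (·.1) := by
  exact PySem.List.foldl_append_if (fun cp => cp.2 == p) (·.1) cities acc

-- ===== VERDICT (by name: the statement is the Claim_ definition above) =====
theorem get_city_clusters_spec : Claim_equal_get_city_clusters := by
  intro cities provinces _
  unfold Spec_get_city_clusters get_city_clusters get_city_clusters_alt
  have hfun : (fun (acc : List String) (province : String) =>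
      acc ++ (cities.foldl (fun d cp => d.modify cp.2 [] (· ++ [cp.1])) PySem.Dict.empty).getD province [])
    = fun (result : List String) (province : String) =>
      cities.foldl (fun result city => if city.2 == province then result ++ [city.1] else result) result := by
    funext acc p
    rw [pv_bucket cities PySem.Dict.empty p, pv_inner]
    simp
  simp only [hfun]
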